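-- pv_equiv track=rewrite | github.com/VAC4EU/Codemapper | AESI-import/AESI-dedup.py | mkrow
-- ===== SOURCE A (Python) =====
-- def mkrow(sab=None, code=None, str=None, cui=None, row=None, **kwargs):
--     if row is None:
--         res = {}
--     else:
--         res = mkrow(row.get('sab'), row.get('code'), row.get('str'), row.get('cui'))
--     if sab is not None:
--         res['sab'] = sab
--     if code is not None:
--         res['code'] = code
--     if str is not None:
--         res['str'] = str
--     if cui is not None:
--         res['cui'] = cui
--     return res
-- ===== SOURCE B (Python) =====
-- KEYS = ('sab', 'code', 'str', 'cui')
--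
-- def mkrow(sab=None, code=None, str=None, cui=None, row=None, **kwargs):
--     res = {}
--     if row is not None:
--         for key in KEYS:
--             val = row.get(key)
--             if val is not None:
--                 res[key] = val
--     for key, val in zip(KEYS, (sab, code, str, cui)):
--         if val is not None:
--             res[key] = val
--     return res
-- ===== Notes on version B (the rewrite author's own statement) =====
-- stated objective: simpler
-- what changed: Replaced the single-level recursive call with a flat table-driven build: one loop copies the four keys from row (non-None values only), a second loop over (key, arg) pairs applies the explicit-argument overrides.
import Mathlib
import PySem

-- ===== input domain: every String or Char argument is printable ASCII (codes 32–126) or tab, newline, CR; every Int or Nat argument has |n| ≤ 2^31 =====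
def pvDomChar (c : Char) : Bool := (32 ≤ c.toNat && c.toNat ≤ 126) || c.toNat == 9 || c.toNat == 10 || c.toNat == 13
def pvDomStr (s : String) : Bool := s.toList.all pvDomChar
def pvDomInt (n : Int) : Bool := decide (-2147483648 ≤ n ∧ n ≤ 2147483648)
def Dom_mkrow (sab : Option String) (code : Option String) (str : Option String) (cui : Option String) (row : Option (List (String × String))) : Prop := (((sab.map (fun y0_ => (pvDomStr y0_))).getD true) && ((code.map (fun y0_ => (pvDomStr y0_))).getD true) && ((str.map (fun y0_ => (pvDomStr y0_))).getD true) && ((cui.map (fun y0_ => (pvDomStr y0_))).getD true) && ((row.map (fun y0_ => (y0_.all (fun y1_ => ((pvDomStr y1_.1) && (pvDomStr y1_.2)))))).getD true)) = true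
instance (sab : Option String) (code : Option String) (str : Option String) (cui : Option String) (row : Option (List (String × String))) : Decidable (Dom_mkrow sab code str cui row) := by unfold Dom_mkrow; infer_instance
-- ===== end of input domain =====

-- B replaces the single-level recursion of A with a flat two-loop, table-driven build (objective: simpler).


-- ===== PORT A =====
def mkrow (sab : Option String) (code : Option String) (str : Option String) (cui : Option String) (row : Option (List (String × String))) : List (String × String) :=
  -- res = {} or res = mkrow(row.get('sab'), row.get('code'), row.get('str'), row.get('cui'))
  let res : PySem.Dict String String :=
    match row with
    | none => PySem.Dict.empty
    | some r =>
        PySem.Dict.mk (mkrow ((PySem.Dict.mk r).get? "sab") ((PySem.Dict.mk r).get? "code")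
          ((PySem.Dict.mk r).get? "str") ((PySem.Dict.mk r).get? "cui") none)
  let res := match sab with | some v => res.insert "sab" v | none => res
  let res := match code with | some v => res.insert "code" v | none => res
  let res := match str with | some v => res.insert "str" v | none => res
  let res := match cui with | some v => res.insert "cui" v | none => res
  res.items
termination_by row.elim 0 (fun _ => 1)
decreasing_by simp

-- ===== PORT B =====
def mkrow_alt (sab : Option String) (code : Option String) (str : Option String) (cui : Option String) (row : Option (List (String × String))) : List (String × String) :=
  let keys : List String := ["sab", "code", "str", "cui"]
  let res : PySem.Dict String String :=
    match row with
    | none => PySem.Dict.empty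
    | some r =>
        keys.foldl (fun d k =>
          match (PySem.Dict.mk r).get? k with
          | some v => d.insert k v
          | none => d) PySem.Dict.empty
  let res := (keys.zip [sab, code, str, cui]).foldl (fun d kv =>
      match kv.2 with
      | some v => d.insert kv.1 v
      | none => d) res
  res.items

-- ===== PRECONDITION & SPEC =====
def Spec_mkrow (sab : Option String) (code : Option String) (str : Option String) (cui : Option String) (row : Option (List (String × String))) (out : List (String × String)) : Prop := out = mkrow_alt sab code str cui row
instance (sab : Option String) (code : Option String) (str : Option String) (cui : Option String) (row : Option (List (String × String))) (out : List (String × String)) : Decidable (Spec_mkrow sab code str cui row out) := by unfold Spec_mkrow; infer_instance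

-- ===== CLAIM (what is proved, stated in full; the proofs are below) =====
def Claim_equal_mkrow : Prop := ∀ (sab : Option String) (code : Option String) (str : Option String) (cui : Option String) (row : Option (List (String × String))), Dom_mkrow sab code str cui row → Spec_mkrow sab code str cui row (mkrow sab code str cui row)

-- ===== LEMMAS AND PROOFS =====

-- ===== VERDICT (by name: the statement is the Claim_ definition above) =====
theorem mkrow_spec : Claim_equal_mkrow := by
  intro sab code str cui row _
  unfold Spec_mkrow mkrow mkrow_alt
  cases row with
  | none => rfl
  | some r =>
      simp only [List.foldl, List.zip, List.zipWith]
      cases h1 : (PySem.Dict.mk r).get? "sab" <;>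
      cases h2 : (PySem.Dict.mk r).get? "code" <;>
      cases h3 : (PySem.Dict.mk r).get? "str" <;>
      cases h4 : (PySem.Dict.mk r).get? "cui" <;>
      simp only [mkrow]
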